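-- pv_equiv track=rewrite | github.com/daniel-reich/ubiquitous-fiesta | PxxZprxCjDrzaTcLQ_18.py | vowel_links
-- ===== SOURCE A (Python) =====
-- def vowel_links(txt):
--   vowels = list("aeiou")
--   txt = txt.split(" ")
--   for i in range(len(txt)):
--     try:
--       if txt[i][-1] in vowels and txt[i+1][0] in vowels:
--         return True;
--     except:
--       pass;
--   return False;
-- ===== SOURCE B (Python) =====
-- def vowel_links(txt):
--   vowels = "aeiou"
--   return any(a in vowels and b == " " and c in vowels
--              for a, b, c in zip(txt, txt[1:], txt[2:]))
-- ===== Notes on version B (the rewrite author's own statement) =====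
-- stated objective: idiomatic
-- what changed: B replaces A's split-on-space plus index loop with try/except by a single character-level sliding-window scan for the pattern vowel, space, vowel, which is equivalent because A splits on the single-space separator, so adjacent tokens meet at exactly one space character.
import Mathlib
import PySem

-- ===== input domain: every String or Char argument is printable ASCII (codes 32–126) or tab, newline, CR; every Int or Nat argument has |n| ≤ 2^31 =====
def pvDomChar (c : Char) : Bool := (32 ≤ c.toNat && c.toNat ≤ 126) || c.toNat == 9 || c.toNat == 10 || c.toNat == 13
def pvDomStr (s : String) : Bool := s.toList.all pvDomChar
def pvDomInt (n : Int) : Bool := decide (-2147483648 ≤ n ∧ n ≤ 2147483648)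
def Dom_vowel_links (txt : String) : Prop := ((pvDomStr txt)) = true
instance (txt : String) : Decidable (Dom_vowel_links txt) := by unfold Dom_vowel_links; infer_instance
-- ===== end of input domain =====

-- B replaces A's split-on-space + index loop (try/except) by one character-level scan
-- for the pattern vowel-space-vowel; same O(n) cost, plainer code (objective: idiomatic).


-- ===== PORT A =====
-- vowels = list("aeiou")
def pvVowelsA : List Char := ['a', 'e', 'i', 'o', 'u']

-- the body of A's try/except: an IndexError (empty token, or i+1 past the end) is caught → no return
def pvCheckA (w1? w2? : Option (List Char)) : Bool :=
  match w1?, w2? with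
  | some w1, some w2 =>
    match PySem.Chars.pyGet? w1 (-1), PySem.Chars.pyGet? w2 0 with
    | some c1, some c2 => pvVowelsA.contains c1 && pvVowelsA.contains c2
    | _, _ => false
  | _, _ => false

def vowel_links (txt : String) : Bool :=
  let ts := PySem.Chars.splitOn txt.toList [' ']          -- txt = txt.split(" ")
  (List.range ts.length).any (fun i =>                     -- for i in range(len(txt)): … return True / return False
    pvCheckA (PySem.List.pyGet? ts (i : Int)) (PySem.List.pyGet? ts ((i : Int) + 1)))

-- ===== PORT B =====
-- vowels = "aeiou" (same constant as A's; shared to avoid a duplicate definition)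
-- any(a in vowels and b == " " and c in vowels for a, b, c in zip(txt, txt[1:], txt[2:]))
def pvScanB : List Char → Bool
  | a :: b :: c :: rest =>
      (pvVowelsA.contains a && (b == ' ') && pvVowelsA.contains c) || pvScanB (b :: c :: rest)
  | _ => false

def vowel_links_alt (txt : String) : Bool := pvScanB txt.toList

-- ===== PRECONDITION & SPEC =====
def Spec_vowel_links (txt : String) (out : Bool) : Prop := out = vowel_links_alt txt
instance (txt : String) (out : Bool) : Decidable (Spec_vowel_links txt out) := by unfold Spec_vowel_links; infer_instance

-- ===== CLAIM (what is proved, stated in full; the proofs are below) =====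
def Claim_equal_vowel_links : Prop := ∀ (txt : String), Dom_vowel_links txt → Spec_vowel_links txt (vowel_links txt)

-- ===== LEMMAS AND PROOFS =====

-- proof-only helpers
def pvIsV : Option Char → Bool
  | some c => pvVowelsA.contains c
  | none => false

-- the tokens txt.split(" ") produces, structurally
def pvSplit : List Char → List Char → List (List Char)
  | [], cur => [cur.reverse]
  | c :: rest, cur => if c = ' ' then cur.reverse :: pvSplit rest [] else pvSplit rest (c :: cur)

-- adjacent-token check over the token list
def pvAdj : List (List Char) → Bool
  | w1 :: w2 :: rest => (pvIsV w1.getLast? && pvIsV w2.head?) || pvAdj (w2 :: rest)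
  | _ => false

-- state machine over the characters: pv = "previous char is a vowel"
def pvG (pv : Bool) : List Char → Bool
  | [] => false
  | c :: rest => if c = ' ' then (pv && pvIsV rest.head?) || pvG false rest else pvG (pvVowelsA.contains c) rest

lemma pvGo_eq (fuel : Nat) : ∀ (l cur : List Char) (acc : List (List Char)), l.length < fuel →
    PySem.Chars.splitOn.go [' '] fuel l cur acc = acc.reverse ++ pvSplit l cur := by
  induction fuel with
  | zero => intro l cur acc h; omega
  | succ n ih =>
    intro l cur acc h
    cases l with
    | nil => rw [PySem.Chars.splitOn.go] <;> simp [pvSplit]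
    | cons c rest =>
      rw [PySem.Chars.splitOn.go]
      simp only [List.length_cons] at h
      by_cases hc : c = ' '
      · subst hc
        simp only [List.isPrefixOf, BEq.rfl, Bool.true_and, if_pos, List.length_singleton,
          List.drop_succ_cons, List.drop_zero]
        rw [ih rest [] (cur.reverse :: acc) (by omega)]
        simp [pvSplit]
      · have hp : [' '].isPrefixOf (c :: rest) = false := by
          simp [List.isPrefixOf]; intro hh; exact hc hh.symm
        simp only [hp, Bool.false_eq_true, if_false]
        rw [ih rest (c :: cur) acc (by omega)]
        simp [pvSplit, hc]

lemma pvSplitOn_eq (l : List Char) : PySem.Chars.splitOn l [' '] = pvSplit l [] := by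
  unfold PySem.Chars.splitOn
  rw [pvGo_eq (l.length + 1) l [] [] (by omega)]
  simp

lemma pvGetNeg1 (w : List Char) : PySem.List.pyGet? w (-1) = w.getLast? := by
  simp [PySem.List.pyGet?, PySem.List.pyIdx?]
  rcases w.eq_nil_or_concat with rfl | ⟨ys, a, rfl⟩
  · simp
  · simp

lemma pvGet0 (w : List Char) : PySem.List.pyGet? w 0 = w.head? := by
  cases w <;> simp [PySem.List.pyGet?, PySem.List.pyIdx?]

lemma pvCheckA_some_some (w1 w2 : List Char) :
    pvCheckA (some w1) (some w2) = (pvIsV w1.getLast? && pvIsV w2.head?) := by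
  unfold pvCheckA
  simp only [PySem.Chars.pyGet?, pvGetNeg1, pvGet0]
  cases w1.getLast? <;> cases w2.head? <;> simp [pvIsV]

lemma pvGet1_cons (w : List Char) (ts : List (List Char)) :
    PySem.List.pyGet? (w :: ts) 1 = ts.head? := by
  cases ts <;> simp [PySem.List.pyGet?, PySem.List.pyIdx?]

lemma pvRange_any_eq_adj (ts : List (List Char)) :
    (List.range ts.length).any (fun i =>
      pvCheckA (PySem.List.pyGet? ts (i : Int)) (PySem.List.pyGet? ts ((i : Int) + 1))) = pvAdj ts := by
  induction ts with
  | nil => simp [pvAdj]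
  | cons w ts ih =>
    rw [List.length_cons, List.range_succ_eq_map, List.any_cons, List.any_map]
    have hfun : ((fun i : Nat => pvCheckA (PySem.List.pyGet? (w :: ts) (i : Int))
        (PySem.List.pyGet? (w :: ts) ((i : Int) + 1))) ∘ (fun i : Nat => i + 1)) =
        (fun i : Nat => pvCheckA (PySem.List.pyGet? ts (i : Int)) (PySem.List.pyGet? ts ((i : Int) + 1))) := by
      funext i
      have h2 : ((i + 1 : Nat) : Int) + 1 = ((i + 2 : Nat) : Int) := by push_cast; ring
      have h1 : (i : Int) + 1 = ((i + 1 : Nat) : Int) := by push_cast; ring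
      simp only [Function.comp_apply, h2, h1, PySem.List.pyGet?_natCast]
      simp
    rw [hfun, ih]
    have h0 : PySem.List.pyGet? (w :: ts) ((0 : Nat) : Int) = some w := by
      simp [PySem.List.pyGet?, PySem.List.pyIdx?]
    rw [show (((0 : Nat) : Int) + 1) = (1 : Int) by norm_num]
    rw [h0, pvGet1_cons]
    cases ts with
    | nil => simp [pvAdj, pvCheckA]
    | cons w2 ts' => simp [pvAdj, pvCheckA_some_some]

lemma pvSplit_ne_nil (l : List Char) : ∀ cur, pvSplit l cur ≠ [] := by
  induction l with
  | nil => intro cur; simp [pvSplit]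
  | cons c rest ih =>
    intro cur
    by_cases hc : c = ' ' <;> simp [pvSplit, hc, ih]

lemma pvHeadAux (l : List Char) : ∀ cur, cur ≠ [] → (pvSplit l cur).headI.head? = cur.reverse.head? := by
  induction l with
  | nil => intro cur _; simp [pvSplit]
  | cons c rest ih =>
    intro cur hcur
    by_cases hc : c = ' '
    · simp [pvSplit, hc]
    · rw [pvSplit, if_neg hc, ih (c :: cur) (by simp)]
      cases hcr : cur.reverse with
      | nil => exact absurd (by simpa using congrArg List.reverse hcr) hcur
      | cons x xs => simp [hcr]

lemma pvFirstHead (l : List Char) : pvIsV (pvSplit l []).headI.head? = pvIsV l.head? := by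
  cases l with
  | nil => simp [pvSplit]
  | cons c rest =>
    by_cases hc : c = ' '
    · subst hc
      simp [pvSplit, pvIsV, pvVowelsA]
    · rw [pvSplit, if_neg hc, pvHeadAux rest [c] (by simp)]
      simp

lemma pvAdj_split (l : List Char) : ∀ cur, pvAdj (pvSplit l cur) = pvG (pvIsV cur.head?) l := by
  induction l with
  | nil => intro cur; simp [pvSplit, pvAdj, pvG]
  | cons c rest ih =>
    intro cur
    by_cases hc : c = ' '
    · subst hc
      rw [pvSplit, if_pos rfl, pvG, if_pos rfl]
      cases hs : pvSplit rest [] with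
      | nil => exact absurd hs (pvSplit_ne_nil rest [])
      | cons w2 ws =>
        rw [pvAdj]
        have h2 : pvIsV w2.head? = pvIsV rest.head? := by
          have := pvFirstHead rest
          rwa [hs] at this
        rw [h2, ← hs, ih []]
        simp [pvIsV, List.getLast?_reverse]
    · rw [pvSplit, if_neg hc, pvG, if_neg hc, ih (c :: cur)]
      simp [pvIsV]

lemma pvScan_cons (l : List Char) : ∀ c0, pvScanB (c0 :: l) = pvG (pvVowelsA.contains c0) l := by
  induction l with
  | nil => intro c0; simp [pvScanB, pvG]
  | cons c1 rest ih =>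
    intro c0
    cases rest with
    | nil =>
      by_cases h : c1 = ' ' <;> simp [pvScanB, pvG, h, pvIsV]
    | cons c2 rest' =>
      by_cases h : c1 = ' '
      · subst h
        simp only [pvScanB, ih ' ']
        simp [pvG, pvIsV, pvVowelsA, pvVowelsA]
      · have hb : (c1 == ' ') = false := by simpa using h
        simp only [pvScanB, ih c1]
        simp [pvG, pvIsV, h, hb, pvVowelsA, pvVowelsA]

lemma pvScan_eq_g (l : List Char) : pvScanB l = pvG false l := by
  cases l with
  | nil => simp [pvScanB, pvG]
  | cons c0 rest =>
    by_cases h : c0 = ' '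
    · subst h
      rw [pvScan_cons rest ' ']
      simp [pvG, pvIsV, pvVowelsA]
    · rw [pvScan_cons rest c0]
      simp [pvG, h]

-- ===== VERDICT (by name: the statement is the Claim_ definition above) =====
theorem vowel_links_spec : Claim_equal_vowel_links := by
  intro txt _
  unfold Spec_vowel_links vowel_links vowel_links_alt
  rw [pvSplitOn_eq, pvRange_any_eq_adj, pvAdj_split, pvScan_eq_g]
  simp [pvIsV]
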